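-- pv_equiv track=rewrite | github.com/k-harada/AtCoder | ABC/ABC298/F.py | solve
-- ===== SOURCE A (Python) =====
-- def solve(n, rcx_list):
--     # 交差を無視して上からn + 1個を評価すればいい
--     r_dict = dict()
--     c_dict = dict()
--     rc_dict = dict()
--     for r, c, x in rcx_list:
--         r_dict[r] = 0
--         c_dict[c] = 0
--         rc_dict[f"{r}_{c}"] = x
--     for r, c, x in rcx_list:
--         r_dict[r] += x
--         c_dict[c] += x
--     # 候補探索
--     rv_list = []
--     for r in r_dict.keys():
--         rv_list.append((r, r_dict[r]))
--     rv_list = list(sorted(rv_list, key=lambda rv: -rv[1]))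
--     cv_list = []
--     for c in c_dict.keys():
--         cv_list.append((c, c_dict[c]))
--     cv_list = list(sorted(cv_list, key=lambda cv: -cv[1]))
--
--     res = 0
--
--     for r, v1 in rv_list:
--         for c, v2 in cv_list:
--             if f"{r}_{c}" in rc_dict.keys():
--                 res = max(res, v1 + v2 - rc_dict[f"{r}_{c}"])
--             else:
--                 res = max(res, v1 + v2)
--                 break
--
--     return res
-- ===== SOURCE B (Python) =====
-- def solve(n, rcx_list):
--     # Column-major sweep: one pass builds all tables; then columns are visited in
--     # descending column-sum order while a shrinking "active" row set records, for
--     # each still-active row, either a present-cell candidate or its final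
--     # missing-column candidate.
--     rowsum = {}
--     colsum = {}
--     cell = {}
--     rowset = {}
--     for r, c, x in rcx_list:
--         rowsum[r] = rowsum.get(r, 0) + x
--         colsum[c] = colsum.get(c, 0) + x
--         cell[(r, c)] = x
--         rowset.setdefault(r, set()).add(c)
--     cv = sorted(colsum.items(), key=lambda p: -p[1])
--     best = 0
--     active = list(rowsum.items())
--     for c, v in cv:
--         still = []
--         for r, rs in active:
--             if c in rowset[r]:
--                 best = max(best, rs + v - cell[(r, c)])
--                 still.append((r, rs))
--             else:
--                 best = max(best, rs + v)
--         active = still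
--     return best
-- ===== Notes on version B (the rewrite author's own statement) =====
-- stated objective: alternative
-- what changed: A's row-major nested scan (rows sorted by sum, inner column scan with break, presence tested via a string-keyed f"{r}_{c}" dict built in two passes) is replaced by a single pass that builds rowsum/colsum/cell/row-column-set tables, then a column-major sweep over the columns in descending-sum order that maintains a shrinking active-row list, finalising each row at its first missing column.
import Mathlib
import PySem

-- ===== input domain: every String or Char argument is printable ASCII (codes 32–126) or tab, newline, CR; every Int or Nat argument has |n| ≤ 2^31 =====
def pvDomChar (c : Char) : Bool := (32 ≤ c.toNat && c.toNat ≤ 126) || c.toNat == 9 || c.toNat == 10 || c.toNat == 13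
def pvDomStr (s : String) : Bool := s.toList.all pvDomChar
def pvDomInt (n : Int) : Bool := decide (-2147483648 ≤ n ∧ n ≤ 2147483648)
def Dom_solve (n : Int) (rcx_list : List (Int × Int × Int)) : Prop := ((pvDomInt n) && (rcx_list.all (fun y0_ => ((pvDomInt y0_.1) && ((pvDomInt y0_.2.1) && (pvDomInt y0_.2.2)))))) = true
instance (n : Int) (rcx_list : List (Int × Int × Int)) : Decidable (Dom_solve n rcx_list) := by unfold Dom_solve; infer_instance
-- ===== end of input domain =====

-- B replaces A's row-major nested scan over string-keyed dicts by a single-pass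
-- table build plus a column-major sweep over a shrinking active-row list
-- (objective: alternative decomposition, same asymptotic cost).

-- ===== PORT A =====

-- f"{r}_{c}"  (strings are ported as List Char per the PySem convention)
def pvKeyA (r c : Int) : List Char := PySem.Int.toChars r ++ '_' :: PySem.Int.toChars c

-- the inner 'for c, v2 in cv_list: … else: …; break' loop, carrying res
def pvInnerA (rc : PySem.Dict (List Char) Int) (r v1 : Int) :
    List (Int × Int) → Int → Int
  | [], res => res
  | (c, v2) :: rest, res =>
    if rc.contains (pvKeyA r c) then
      -- rc_dict[f"{r}_{c}"]: the key is present on this branch, so getD is exact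
      pvInnerA rc r v1 rest (max res (v1 + v2 - rc.getD (pvKeyA r c) 0))
    else
      max res (v1 + v2)

def solve (n : Int) (rcx_list : List (Int × Int × Int)) : Int :=
  -- first loop: r_dict[r] = 0; c_dict[c] = 0; rc_dict[f"{r}_{c}"] = x
  let d0 := rcx_list.foldl
    (fun s t => (s.1.insert t.1 (0 : Int),
                 s.2.1.insert t.2.1 (0 : Int),
                 s.2.2.insert (pvKeyA t.1 t.2.1) t.2.2))
    ((PySem.Dict.empty, PySem.Dict.empty, PySem.Dict.empty) :
      PySem.Dict Int Int × PySem.Dict Int Int × PySem.Dict (List Char) Int)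
  let rc_dict := d0.2.2
  -- second loop: r_dict[r] += x; c_dict[c] += x (keys present, so modify _ 0 is exact)
  let d1 := rcx_list.foldl
    (fun s t => (s.1.modify t.1 0 (· + t.2.2), s.2.modify t.2.1 0 (· + t.2.2)))
    (d0.1, d0.2.1)
  let r_dict := d1.1
  let c_dict := d1.2
  -- rv_list built over keys, then sorted by -value (r_dict[r]: key present, getD exact)
  let rv0 := r_dict.keys.foldl (fun acc r => acc ++ [(r, r_dict.getD r 0)]) []
  let rv_list := PySem.List.sorted rv0 (fun rv => -rv.2) false
  let cv0 := c_dict.keys.foldl (fun acc c => acc ++ [(c, c_dict.getD c 0)]) []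
  let cv_list := PySem.List.sorted cv0 (fun cv => -cv.2) false
  rv_list.foldl (fun res rv => pvInnerA rc_dict rv.1 rv.2 cv_list res) 0

-- ===== PORT B =====

def solve_alt (n : Int) (rcx_list : List (Int × Int × Int)) : Int :=
  -- one pass builds rowsum, colsum, cell and rowset
  let t0 := rcx_list.foldl
    (fun s t => (s.1.insert t.1 (s.1.getD t.1 0 + t.2.2),
                 s.2.1.insert t.2.1 (s.2.1.getD t.2.1 0 + t.2.2),
                 s.2.2.1.insert (t.1, t.2.1) t.2.2,
                 s.2.2.2.insert t.1 (PySem.Set.add (s.2.2.2.getD t.1 PySem.Set.empty) t.2.1)))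
    ((PySem.Dict.empty, PySem.Dict.empty, PySem.Dict.empty, PySem.Dict.empty) :
      PySem.Dict Int Int × PySem.Dict Int Int × PySem.Dict (Int × Int) Int ×
      PySem.Dict Int (PySem.Set Int))
  let rowsum := t0.1
  let colsum := t0.2.1
  let cell := t0.2.2.1
  let rowset := t0.2.2.2
  let cv := PySem.List.sorted colsum.items (fun p => -p.2) false
  -- column-major sweep; state = (best, active); rowset[r] / cell[(r,c)] are present
  -- wherever they are read, so getD is exact
  let st := cv.foldl
    (fun st p =>
      st.2.foldl
        (fun bs rv =>
          if PySem.Set.contains (rowset.getD rv.1 PySem.Set.empty) p.1 then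
            (max bs.1 (rv.2 + p.2 - cell.getD (rv.1, p.1) 0), bs.2 ++ [rv])
          else
            (max bs.1 (rv.2 + p.2), bs.2))
        (st.1, ([] : List (Int × Int))))
    ((0 : Int), rowsum.items)
  st.1

-- ===== PRECONDITION & SPEC =====
def Spec_solve (n : Int) (rcx_list : List (Int × Int × Int)) (out : Int) : Prop := out = solve_alt n rcx_list
instance (n : Int) (rcx_list : List (Int × Int × Int)) (out : Int) : Decidable (Spec_solve n rcx_list out) := by unfold Spec_solve; infer_instance

-- ===== CLAIM (what is proved, stated in full; the proofs are below) =====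
def Claim_equal_solve : Prop := ∀ (n : Int) (rcx_list : List (Int × Int × Int)), Dom_solve n rcx_list → Spec_solve n rcx_list (solve n rcx_list)

-- ===== LEMMAS AND PROOFS =====

theorem pv_digitChar_ne (d : Nat) (hd : d < 10) : Nat.digitChar d ≠ '-' ∧ Nat.digitChar d ≠ '_' := by
  interval_cases d <;> decide

theorem pv_toDigits_chars (n : Nat) : ∀ c ∈ Nat.toDigits 10 n, ∃ d, d < 10 ∧ c = Nat.digitChar d := by
  induction n using Nat.strong_induction_on with
  | _ n ih =>
    rw [Nat.toDigits_eq_if (by norm_num)]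
    split
    · intro c hc
      simp at hc
      exact ⟨n, by omega, hc⟩
    · intro c hc
      rcases List.mem_append.1 hc with h | h
      · exact ih (n / 10) (by omega) c h
      · simp at h
        exact ⟨n % 10, by omega, h⟩

theorem pv_toDigits_ne_nil (n : Nat) : Nat.toDigits 10 n ≠ [] := by
  rw [Nat.toDigits_eq_if (by norm_num)]
  split <;> simp

theorem pv_toDigits_inj : ∀ m n : Nat, Nat.toDigits 10 m = Nat.toDigits 10 n → m = n := by
  intro m
  induction m using Nat.strong_induction_on with
  | _ m ih =>
    intro n h
    rw [Nat.toDigits_eq_if (show 1 < 10 by norm_num)] at h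
    rw [Nat.toDigits_eq_if (show 1 < 10 by norm_num) (n := n)] at h
    split at h <;> split at h
    · rename_i hm hn
      simp at h
      interval_cases m <;> interval_cases n <;> revert h <;> decide
    · exfalso
      have hl := congrArg List.length h
      simp only [List.length_cons, List.length_append, List.length_nil] at hl
      have h1 : (Nat.toDigits 10 (n / 10)).length ≠ 0 := by
        simpa [List.length_eq_zero_iff] using pv_toDigits_ne_nil (n / 10)
      omega
    · exfalso
      have hl := congrArg List.length h
      simp only [List.length_cons, List.length_append, List.length_nil] at hl
      have h1 : (Nat.toDigits 10 (m / 10)).length ≠ 0 := by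
        simpa [List.length_eq_zero_iff] using pv_toDigits_ne_nil (m / 10)
      omega
    · rename_i hm hn
      have := List.append_inj' h (by simp)
      obtain ⟨h1, h2⟩ := this
      have e1 : m / 10 = n / 10 := ih (m / 10) (by omega) _ h1
      simp at h2
      have e2 : m % 10 = n % 10 := by
        by_contra hne
        have d1 := pv_digitChar_ne (m % 10) (by omega)
        -- digitChar injective below 10
        have : ∀ a b : Nat, a < 10 → b < 10 → Nat.digitChar a = Nat.digitChar b → a = b := by
          intro a b ha hb hab
          interval_cases a <;> interval_cases b <;> revert hab <;> decide
        exact hne (this _ _ (by omega) (by omega) h2)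
      omega

theorem pv_toChars_chars (n : Int) :
    ∀ c ∈ PySem.Int.toChars n, c = '-' ∨ ∃ d, d < 10 ∧ c = Nat.digitChar d := by
  intro c hc
  unfold PySem.Int.toChars at hc
  split at hc
  · rcases hc with _ | hc
    · left; rfl
    · right; exact pv_toDigits_chars _ c (by assumption)
  · right; exact pv_toDigits_chars _ c hc

theorem pv_underscore_not_mem (n : Int) : '_' ∉ PySem.Int.toChars n := by
  intro h
  rcases pv_toChars_chars n '_' h with h | ⟨d, hd, h⟩
  · simp at h
  · exact (pv_digitChar_ne d hd).2 h.symm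

theorem pv_toChars_inj : ∀ m n : Int, PySem.Int.toChars m = PySem.Int.toChars n → m = n := by
  intro m n h
  unfold PySem.Int.toChars at h
  have hhead : ∀ k : Nat, '-' ∉ Nat.toDigits 10 k := by
    intro k hk
    obtain ⟨d, hd, he⟩ := pv_toDigits_chars k '-' hk
    exact (pv_digitChar_ne d hd).1 he.symm
  split at h <;> split at h
  · rename_i hm hn
    simp at h
    have := pv_toDigits_inj _ _ h
    omega
  · exfalso
    exact hhead n.toNat (h ▸ List.mem_cons_self)
  · exfalso
    exact hhead m.toNat (h.symm ▸ List.mem_cons_self)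
  · rename_i hm hn
    have := pv_toDigits_inj _ _ h
    omega

theorem pv_split_underscore : ∀ (a : List Char) (b : List Char) (a' b' : List Char),
    '_' ∉ a → '_' ∉ a' → a ++ '_' :: b = a' ++ '_' :: b' → a = a' ∧ b = b' := by
  intro a
  induction a with
  | nil =>
    intro b a' b' _ ha' h
    cases a' with
    | nil => simp_all
    | cons c t =>
      simp at h
      exact absurd (h.1 ▸ ha') (by simp)
  | cons c t ih =>
    intro b a' b' ha ha' h
    cases a' with
    | nil =>
      simp at h
      exact absurd (h.1 ▸ ha) (by simp)
    | cons c' t' =>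
      simp at h
      obtain ⟨rfl, h2⟩ := h
      have := ih b t' b' (by simp at ha; exact ha.2) (by simp at ha'; exact ha'.2) h2
      simp_all

theorem pvKeyA_inj (r c r' c' : Int) (h : pvKeyA r c = pvKeyA r' c') : r = r' ∧ c = c' := by
  unfold pvKeyA at h
  have := pv_split_underscore _ _ _ _ (pv_underscore_not_mem r) (pv_underscore_not_mem r') h
  exact ⟨pv_toChars_inj _ _ this.1, pv_toChars_inj _ _ this.2⟩

-- getD after a zero-insert loop is always 0 (given it started that way)
theorem pv_getD_insert0 {β : Type} (k : β → Int) :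
    ∀ (l : List β) (d : PySem.Dict Int Int), (∀ q, d.getD q 0 = 0) →
    ∀ q, (l.foldl (fun d t => d.insert (k t) (0 : Int)) d).getD q 0 = 0 := by
  intro l
  induction l with
  | nil => intro d hd q; simpa using hd q
  | cons t rest ih =>
    intro d hd q
    simp only [List.foldl_cons]
    refine ih _ ?_ q
    intro q'
    rw [PySem.Dict.getD_insert]
    split <;> simp [hd]

-- getD after a modify-add loop: initial value plus the sum of matching weights
theorem pv_getD_modify_sum {β : Type} (k : β → Int) (w : β → Int) :
    ∀ (l : List β) (d : PySem.Dict Int Int) (q : Int),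
    (l.foldl (fun d t => d.modify (k t) 0 (· + w t)) d).getD q 0 =
      d.getD q 0 + ((l.filter (fun t => k t == q)).map w).sum := by
  intro l
  induction l with
  | nil => simp
  | cons t rest ih =>
    intro d q
    simp only [List.foldl_cons]
    rw [ih]
    rw [PySem.Dict.getD_modify]
    by_cases h : q = k t
    · simp [h]
      ring
    · simp [Ne.symm h, h]

-- getD after an insert-get-add loop: same characterisation
theorem pv_getD_insert_add_sum {β : Type} (k : β → Int) (w : β → Int) :
    ∀ (l : List β) (d : PySem.Dict Int Int) (q : Int),
    (l.foldl (fun d t => d.insert (k t) (d.getD (k t) 0 + w t)) d).getD q 0 =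
      d.getD q 0 + ((l.filter (fun t => k t == q)).map w).sum := by
  intro l
  induction l with
  | nil => simp
  | cons t rest ih =>
    intro d q
    simp only [List.foldl_cons]
    rw [ih]
    rw [PySem.Dict.getD_insert]
    by_cases h : q = k t
    · simp [h]
      ring
    · simp [Ne.symm h, h]

-- Set.update with no new elements is the identity
theorem pv_update_self {α : Type} [BEq α] [LawfulBEq α] (s : PySem.Set α) (xs : List α)
    (h : ∀ x ∈ xs, x ∈ s) : PySem.Set.update s xs = s := by
  rw [PySem.Set.update_eq_append_filter]
  have : List.filter (fun y => !s.contains y) (PySem.Set.ofList xs) = [] := by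
    rw [List.filter_eq_nil_iff]
    intro a ha
    have := h a ((PySem.Set.mem_ofList xs a).1 ha)
    simp [PySem.Set.contains_eq_listContains]
    exact this
  rw [this, List.append_nil]

-- insert loops through an injective key encoding have pointwise-equal lookups
theorem pv_get?_phi (phi : Int × Int → List Char)
    (hphi : ∀ p p', phi p = phi p' → p = p') :
    ∀ (l : List (Int × Int × Int)) (d : PySem.Dict (List Char) Int)
      (d' : PySem.Dict (Int × Int) Int),
    (∀ p, d.get? (phi p) = d'.get? p) →
    ∀ q, (l.foldl (fun d t => d.insert (phi (t.1, t.2.1)) t.2.2) d).get? (phi q) =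
         (l.foldl (fun d t => d.insert (t.1, t.2.1) t.2.2) d').get? q := by
  intro l
  induction l with
  | nil => intro d d' h q; simpa using h q
  | cons t rest ih =>
    intro d d' h q
    simp only [List.foldl_cons]
    refine ih _ _ ?_ q
    intro p
    rw [PySem.Dict.get?_insert, PySem.Dict.get?_insert]
    by_cases hp : p = (t.1, t.2.1)
    · simp [hp]
    · have : phi p ≠ phi (t.1, t.2.1) := fun he => hp (hphi _ _ he)
      simp [hp, this, h p]

-- membership in the per-row column set built by the rowset loop
theorem pv_rowset_mem :
    ∀ (l : List (Int × Int × Int)) (d : PySem.Dict Int (PySem.Set Int)) (r c : Int),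
    (c ∈ (l.foldl (fun d t => d.insert t.1 (PySem.Set.add (d.getD t.1 PySem.Set.empty) t.2.1)) d).getD r PySem.Set.empty ↔
      c ∈ d.getD r PySem.Set.empty ∨ (r, c) ∈ l.map (fun t => (t.1, t.2.1))) := by
  intro l
  induction l with
  | nil => simp
  | cons t rest ih =>
    intro d r c
    simp only [List.foldl_cons]
    rw [ih]
    rw [PySem.Dict.getD_insert]
    by_cases h : r = t.1
    · subst h
      simp [PySem.Set.mem_add]
      tauto
    · simp [h]

-- the per-row candidate list: present columns until the first absent one
def pvCand (rs : Int) (pres : Int → Bool) (cval : Int → Int) : List (Int × Int) → List Int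
  | [] => []
  | p :: rest => if pres p.1 then (rs + p.2 - cval p.1) :: pvCand rs pres cval rest
                 else [rs + p.2]

-- a max-accumulating row loop is foldl max over the flatMap of candidate lists
theorem pv_foldl_rows {α : Type} (F : α → List Int) :
    ∀ (rows : List α) (b : Int),
    rows.foldl (fun res rv => (F rv).foldl max res) b = (rows.flatMap F).foldl max b := by
  intro rows
  induction rows with
  | nil => simp
  | cons a rest ih => intro b; simp [List.foldl_append, ih]

theorem pv_max_rc : RightCommutative (max : Int → Int → Int) :=
  ⟨fun b a₁ a₂ => max_right_comm b a₁ a₂⟩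

theorem pv_foldl_max_perm {l₁ l₂ : List Int} (h : l₁.Perm l₂) (b : Int) :
    l₁.foldl max b = l₂.foldl max b := by
  haveI := pv_max_rc
  exact h.foldl_eq b

-- the multiset of candidates emitted at one column plus the remaining ones
theorem pv_interleave_perm (keep : α → Bool) (h : α → Int) (C : α → List Int) :
    ∀ (active : List α),
    (active.flatMap (fun rv => if keep rv then h rv :: C rv else [h rv])).Perm
      (active.map h ++ (active.filter keep).flatMap C) := by
  intro active
  induction active with
  | nil => simp
  | cons a rest ih =>
    by_cases hk : keep a
    · simp only [List.flatMap_cons, List.map_cons, List.filter_cons, hk, if_pos]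
      refine List.Perm.trans (List.Perm.append_left _ ih) ?_
      simp only [List.cons_append]
      refine List.Perm.cons _ ?_
      exact (List.perm_append_comm_assoc _ _ _)
    · simp only [List.flatMap_cons, List.map_cons, List.filter_cons, hk]
      simp only [Bool.false_eq_true, if_false, List.cons_append]
      exact List.Perm.cons _ ih

-- A's inner break loop is foldl max over the candidate list
theorem pv_innerA_eq (rc : PySem.Dict (List Char) Int) (r v1 : Int) :
    ∀ (l : List (Int × Int)) (res : Int),
    pvInnerA rc r v1 l res =
      (pvCand v1 (fun c => rc.contains (pvKeyA r c)) (fun c => rc.getD (pvKeyA r c) 0) l).foldl max res := by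
  intro l
  induction l with
  | nil => intro res; simp [pvInnerA, pvCand]
  | cons p rest ih =>
    intro res
    obtain ⟨c, v2⟩ := p
    by_cases h : rc.contains (pvKeyA r c)
    · simp [pvInnerA, pvCand, h, ih]
    · simp [pvInnerA, pvCand, h]

-- B's inner row loop computes the running max and the surviving rows
theorem pv_innerB_eq (pres : Int → Int → Bool) (cval : Int → Int → Int) (c v : Int) :
    ∀ (active : List (Int × Int)) (b : Int) (acc : List (Int × Int)),
    active.foldl
      (fun bs rv =>
        if pres rv.1 c then (max bs.1 (rv.2 + v - cval rv.1 c), bs.2 ++ [rv])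
        else (max bs.1 (rv.2 + v), bs.2)) (b, acc)
    = ((active.map (fun rv => if pres rv.1 c then rv.2 + v - cval rv.1 c else rv.2 + v)).foldl max b,
       acc ++ active.filter (fun rv => pres rv.1 c)) := by
  intro active
  induction active with
  | nil => simp
  | cons a rest ih =>
    intro b acc
    by_cases h : pres a.1 c
    · simp [h, ih]
    · simp [h, ih]

-- B's column-major sweep accumulates exactly the flatMap of candidate lists
theorem pv_Bmain (pres : Int → Int → Bool) (cval : Int → Int → Int) :
    ∀ (cv : List (Int × Int)) (active : List (Int × Int)) (b : Int),
    (cv.foldl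
      (fun st p =>
        st.2.foldl
          (fun bs rv =>
            if pres rv.1 p.1 then (max bs.1 (rv.2 + p.2 - cval rv.1 p.1), bs.2 ++ [rv])
            else (max bs.1 (rv.2 + p.2), bs.2))
          (st.1, ([] : List (Int × Int))))
      (b, active)).1
    = (active.flatMap (fun rv => pvCand rv.2 (pres rv.1) (cval rv.1) cv)).foldl max b := by
  intro cv
  induction cv with
  | nil => intro active b; simp [pvCand, List.flatMap_def]
  | cons p rest ih =>
    intro active b
    simp only [List.foldl_cons]
    rw [pv_innerB_eq]
    rw [ih]
    simp only [List.nil_append]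
    have hfun : (fun rv : Int × Int => pvCand rv.2 (pres rv.1) (cval rv.1) (p :: rest)) =
        (fun rv : Int × Int =>
          if pres rv.1 p.1 then
            (if pres rv.1 p.1 then rv.2 + p.2 - cval rv.1 p.1 else rv.2 + p.2) ::
              pvCand rv.2 (pres rv.1) (cval rv.1) rest
          else [if pres rv.1 p.1 then rv.2 + p.2 - cval rv.1 p.1 else rv.2 + p.2]) := by
      funext rv
      by_cases h : pres rv.1 p.1 <;> simp [pvCand, h]
    rw [hfun]
    rw [pv_foldl_max_perm (pv_interleave_perm _ _ _ _)]
    rw [List.foldl_append]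


-- splitting the one-pass tuple folds of the two ports into component folds
theorem pv_splitA1 (l : List (Int × Int × Int)) :
    ∀ (d1 d2 : PySem.Dict Int Int) (d3 : PySem.Dict (List Char) Int),
    l.foldl (fun s t => (s.1.insert t.1 (0 : Int), s.2.1.insert t.2.1 (0 : Int),
                         s.2.2.insert (pvKeyA t.1 t.2.1) t.2.2)) (d1, d2, d3) =
      (l.foldl (fun d t => d.insert t.1 (0 : Int)) d1,
       l.foldl (fun d t => d.insert t.2.1 (0 : Int)) d2,
       l.foldl (fun d t => d.insert (pvKeyA t.1 t.2.1) t.2.2) d3) := by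
  induction l with
  | nil => intro d1 d2 d3; rfl
  | cons t rest ih => intro d1 d2 d3; simp only [List.foldl_cons]; exact ih _ _ _

theorem pv_splitA2 (l : List (Int × Int × Int)) :
    ∀ (d1 d2 : PySem.Dict Int Int),
    l.foldl (fun s t => (s.1.modify t.1 0 (· + t.2.2), s.2.modify t.2.1 0 (· + t.2.2))) (d1, d2) =
      (l.foldl (fun d t => d.modify t.1 0 (· + t.2.2)) d1,
       l.foldl (fun d t => d.modify t.2.1 0 (· + t.2.2)) d2) := by
  induction l with
  | nil => intro d1 d2; rfl
  | cons t rest ih => intro d1 d2; simp only [List.foldl_cons]; exact ih _ _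

theorem pv_splitB (l : List (Int × Int × Int)) :
    ∀ (d1 d2 : PySem.Dict Int Int) (d3 : PySem.Dict (Int × Int) Int)
      (d4 : PySem.Dict Int (PySem.Set Int)),
    l.foldl (fun s t => (s.1.insert t.1 (s.1.getD t.1 0 + t.2.2),
                         s.2.1.insert t.2.1 (s.2.1.getD t.2.1 0 + t.2.2),
                         s.2.2.1.insert (t.1, t.2.1) t.2.2,
                         s.2.2.2.insert t.1 (PySem.Set.add (s.2.2.2.getD t.1 PySem.Set.empty) t.2.1)))
      (d1, d2, d3, d4) =
      (l.foldl (fun d t => d.insert t.1 (d.getD t.1 0 + t.2.2)) d1,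
       l.foldl (fun d t => d.insert t.2.1 (d.getD t.2.1 0 + t.2.2)) d2,
       l.foldl (fun d t => d.insert (t.1, t.2.1) t.2.2) d3,
       l.foldl (fun d t => d.insert t.1 (PySem.Set.add (d.getD t.1 PySem.Set.empty) t.2.1)) d4) := by
  induction l with
  | nil => intro d1 d2 d3 d4; rfl
  | cons t rest ih => intro d1 d2 d3 d4; simp only [List.foldl_cons]; exact ih _ _ _ _

-- A's zero-then-accumulate dict equals B's single-pass sum dict
theorem pv_sum_dicts_eq {β : Type} (k : β → Int) (w : β → Int) (l : List β) :
    l.foldl (fun d t => d.modify (k t) 0 (· + w t))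
      (l.foldl (fun d t => d.insert (k t) (0 : Int)) PySem.Dict.empty) =
    l.foldl (fun d t => d.insert (k t) (d.getD (k t) 0 + w t)) PySem.Dict.empty := by
  apply PySem.Dict.ext
  have h0 : ∀ q : Int, (PySem.Dict.empty : PySem.Dict Int Int).getD q 0 = 0 := by
    intro q; simp [PySem.Dict.getD_empty]
  have hk0 : (l.foldl (fun d t => d.insert (k t) (0 : Int)) PySem.Dict.empty).keys =
      PySem.Set.ofList (l.map k) := by
    rw [PySem.Dict.keys_foldl_insert_key]
    simp [PySem.Set.update_nil_left]
  have hk1 : (l.foldl (fun d t => d.modify (k t) 0 (· + w t))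
      (l.foldl (fun d t => d.insert (k t) (0 : Int)) PySem.Dict.empty)).keys =
      PySem.Set.ofList (l.map k) := by
    rw [PySem.Dict.keys_foldl_modify_key, hk0]
    exact pv_update_self _ _ (fun x hx => (PySem.Set.mem_ofList _ x).2 hx)
  have hk2 : (l.foldl (fun d t => d.insert (k t) (d.getD (k t) 0 + w t)) PySem.Dict.empty).keys =
      PySem.Set.ofList (l.map k) := by
    rw [PySem.Dict.keys_foldl_insert_key]
    simp [PySem.Set.update_nil_left]
  have nd1 : (l.foldl (fun d t => d.modify (k t) 0 (· + w t))
      (l.foldl (fun d t => d.insert (k t) (0 : Int)) PySem.Dict.empty)).keys.Nodup := by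
    rw [hk1]; exact PySem.Set.nodup_ofList _
  have nd2 : (l.foldl (fun d t => d.insert (k t) (d.getD (k t) 0 + w t)) PySem.Dict.empty).keys.Nodup := by
    rw [hk2]; exact PySem.Set.nodup_ofList _
  rw [PySem.Dict.items_eq_map_keys _ nd1 0, PySem.Dict.items_eq_map_keys _ nd2 0, hk1, hk2]
  apply List.map_congr_left
  intro q _
  rw [pv_getD_modify_sum, pv_getD_insert_add_sum, pv_getD_insert0 k l _ h0 q]
  simp [PySem.Dict.getD_empty]

-- ===== VERDICT (by name: the statement is the Claim_ definition above) =====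
theorem solve_spec : Claim_equal_solve := by
  unfold Claim_equal_solve
  intro n l _
  unfold Spec_solve
  simp only [solve, solve_alt]
  rw [pv_splitA1, pv_splitB]
  simp only []
  rw [pv_splitA2]
  simp only []
  have e1 : List.foldl (fun d t => d.modify t.1 0 (· + t.2.2))
      (List.foldl (fun d t => d.insert t.1 (0 : Int)) PySem.Dict.empty l) l =
      List.foldl (fun d t => d.insert t.1 (d.getD t.1 0 + t.2.2)) PySem.Dict.empty l :=
    pv_sum_dicts_eq (fun t => t.1) (fun t => t.2.2) l
  have e2 : List.foldl (fun d t => d.modify t.2.1 0 (· + t.2.2))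
      (List.foldl (fun d t => d.insert t.2.1 (0 : Int)) PySem.Dict.empty l) l =
      List.foldl (fun d t => d.insert t.2.1 (d.getD t.2.1 0 + t.2.2)) PySem.Dict.empty l :=
    pv_sum_dicts_eq (fun t => t.2.1) (fun t => t.2.2) l
  rw [e1, e2]
  set RS := List.foldl (fun d t => d.insert t.1 (d.getD t.1 0 + t.2.2)) PySem.Dict.empty l with hRS
  set CS := List.foldl (fun d t => d.insert t.2.1 (d.getD t.2.1 0 + t.2.2)) PySem.Dict.empty l with hCS
  set RC := List.foldl (fun d t => d.insert (pvKeyA t.1 t.2.1) t.2.2) PySem.Dict.empty l with hRC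
  set CELL := List.foldl (fun d t => d.insert (t.1, t.2.1) t.2.2) PySem.Dict.empty l with hCELL
  set RSET := List.foldl (fun d t => d.insert t.1 (PySem.Set.add (d.getD t.1 PySem.Set.empty) t.2.1)) PySem.Dict.empty l with hRSET
  have ndRS : RS.keys.Nodup := by
    rw [hRS]
    exact PySem.Dict.nodup_keys_foldl_insert_key l (fun t => t.1) _ _ (by simp)
  have ndCS : CS.keys.Nodup := by
    rw [hCS]
    exact PySem.Dict.nodup_keys_foldl_insert_key l (fun t => t.2.1) _ _ (by simp)
  have hrv : List.foldl (fun acc r => acc ++ [(r, RS.getD r 0)]) [] RS.keys = RS.items := by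
    rw [PySem.List.foldl_append_singleton_eq_map, ← PySem.Dict.items_eq_map_keys RS ndRS 0]
    simp
  have hcv : List.foldl (fun acc c => acc ++ [(c, CS.getD c 0)]) [] CS.keys = CS.items := by
    rw [PySem.List.foldl_append_singleton_eq_map, ← PySem.Dict.items_eq_map_keys CS ndCS 0]
    simp
  rw [hrv, hcv]
  set cv := PySem.List.sorted CS.items (fun cv => -cv.2) with hcv2
  set rows := RS.items with hrows
  have hB : (List.foldl
      (fun st p =>
        List.foldl
          (fun bs rv =>
            if PySem.Set.contains (RSET.getD rv.1 PySem.Set.empty) p.1 then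
              (max bs.1 (rv.2 + p.2 - CELL.getD (rv.1, p.1) 0), bs.2 ++ [rv])
            else (max bs.1 (rv.2 + p.2), bs.2))
          (st.1, ([] : List (Int × Int))) st.2)
      ((0 : Int), rows) cv).1 =
      (rows.flatMap (fun rv => pvCand rv.2
        (fun c => PySem.Set.contains (RSET.getD rv.1 PySem.Set.empty) c)
        (fun c => CELL.getD (rv.1, c) 0) cv)).foldl max 0 :=
    pv_Bmain (fun r c => PySem.Set.contains (RSET.getD r PySem.Set.empty) c)
      (fun r c => CELL.getD (r, c) 0) cv rows 0
  rw [hB]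
  have hAfun : (fun (res : Int) (rv : Int × Int) => pvInnerA RC rv.1 rv.2 cv res) =
      (fun res rv => (pvCand rv.2 (fun c => RC.contains (pvKeyA rv.1 c))
        (fun c => RC.getD (pvKeyA rv.1 c) 0) cv).foldl max res) :=
    funext fun res => funext fun rv => pv_innerA_eq RC rv.1 rv.2 cv res
  rw [hAfun]
  have hA2 : List.foldl
      (fun res rv => (pvCand rv.2 (fun c => RC.contains (pvKeyA rv.1 c))
        (fun c => RC.getD (pvKeyA rv.1 c) 0) cv).foldl max res)
      0 (PySem.List.sorted rows fun cv => -cv.2) =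
      ((PySem.List.sorted rows fun cv => -cv.2).flatMap
        (fun rv => pvCand rv.2 (fun c => RC.contains (pvKeyA rv.1 c))
          (fun c => RC.getD (pvKeyA rv.1 c) 0) cv)).foldl max 0 :=
    pv_foldl_rows _ _ 0
  rw [hA2]
  have hphi : ∀ p p' : Int × Int, pvKeyA p.1 p.2 = pvKeyA p'.1 p'.2 → p = p' := by
    intro p p' h
    obtain ⟨h1, h2⟩ := pvKeyA_inj _ _ _ _ h
    exact Prod.ext h1 h2
  have hget : ∀ q : Int × Int, RC.get? (pvKeyA q.1 q.2) = CELL.get? q := by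
    intro q
    rw [hRC, hCELL]
    exact pv_get?_phi (fun p => pvKeyA p.1 p.2) hphi l PySem.Dict.empty PySem.Dict.empty
      (fun p => by simp [PySem.Dict.get?_empty]) q
  have hpres : ∀ r c : Int, RC.contains (pvKeyA r c) = PySem.Set.contains (RSET.getD r PySem.Set.empty) c := by
    intro r c
    rw [PySem.Dict.contains_eq_isSome_get?]
    have hg := hget (r, c)
    simp only [] at hg
    rw [hg, ← PySem.Dict.contains_eq_isSome_get?]
    rw [PySem.Dict.contains_eq_decide_mem_keys]
    have hk : CELL.keys = PySem.Set.ofList (l.map (fun t => (t.1, t.2.1))) := by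
      rw [hCELL, PySem.Dict.keys_foldl_insert_key l (fun t => (t.1, t.2.1))]
      simp [PySem.Set.update_nil_left]
    rw [hk]
    have hm := pv_rowset_mem l PySem.Dict.empty r c
    simp only [PySem.Dict.getD_empty] at hm
    rw [PySem.Set.contains_eq_listContains, List.contains_eq_mem, decide_eq_decide,
      PySem.Set.mem_ofList, ← hRSET] at *
    rw [hm]
    simp [PySem.Set.empty]
  have hcval : ∀ r c : Int, RC.getD (pvKeyA r c) 0 = CELL.getD (r, c) 0 := by
    intro r c
    rw [PySem.Dict.getD_eq_get?_getD, PySem.Dict.getD_eq_get?_getD]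
    have hg := hget (r, c)
    simp only [] at hg
    rw [hg]
  have hcand : (fun rv : Int × Int => pvCand rv.2 (fun c => RC.contains (pvKeyA rv.1 c))
      (fun c => RC.getD (pvKeyA rv.1 c) 0) cv) =
      (fun rv => pvCand rv.2 (fun c => PySem.Set.contains (RSET.getD rv.1 PySem.Set.empty) c)
        (fun c => CELL.getD (rv.1, c) 0) cv) := by
    funext rv
    rw [show (fun c => RC.contains (pvKeyA rv.1 c)) =
          (fun c => PySem.Set.contains (RSET.getD rv.1 PySem.Set.empty) c) from
        funext fun c => hpres rv.1 c,
      show (fun c => RC.getD (pvKeyA rv.1 c) 0) = (fun c => CELL.getD (rv.1, c) 0) from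
        funext fun c => hcval rv.1 c]
  rw [hcand]
  exact pv_foldl_max_perm
    (List.Perm.flatMap (PySem.List.sorted_perm rows _ false) (fun a _ => List.Perm.refl _)) 0
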